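-- pv_equiv track=rewrite | github.com/TheKinrar/spicygoat | data/blocks.py | block_to_traits
-- ===== SOURCE A (Python) =====
-- traits = {
--     '_button': ['wallMountable'],
--     'attached_melon_stem': ['orientable'],
--     'attached_pumpkin_stem': ['orientable'],
--     'carved_pumpkin': ['orientable'],
--     'jack_o_lantern': ['orientableOpposite'],
--     'ladder': ['wallMountable'],
--     'soul_wall_torch': ['wallMountable'],
--     'tripwire_hook': ['wallMountable'],
--     'wall_torch': ['wallMountable'],
-- }
--
-- def test_pattern(pattern, block):
--     return (pattern.startswith('_') and block.endswith(pattern)) or block == pattern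
--
-- def block_to_traits(block):
--     for pattern, result in traits.items():
--         if type(pattern) is tuple:
--             if any(test_pattern(p, block) for p in pattern):
--                 return result
--         elif test_pattern(pattern, block):
--             return result
--
--     return []
-- ===== SOURCE B (Python) =====
-- # B: one suffix test then a hash lookup instead of scanning all patterns.
-- _exact = {
--     'attached_melon_stem': ['orientable'],
--     'attached_pumpkin_stem': ['orientable'],
--     'carved_pumpkin': ['orientable'],
--     'jack_o_lantern': ['orientableOpposite'],
--     'ladder': ['wallMountable'],
--     'soul_wall_torch': ['wallMountable'],
--     'tripwire_hook': ['wallMountable'],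
--     'wall_torch': ['wallMountable'],
-- }
-- _button = ['wallMountable']
--
-- def block_to_traits(block):
--     if block.endswith('_button'):
--         return _button
--     return _exact.get(block, [])
-- ===== Notes on version B (the rewrite author's own statement) =====
-- stated objective: simpler
-- what changed: Replaces the ordered scan over a mixed pattern table (with per-entry prefix/suffix pattern tests and tuple handling) by one direct suffix test for the single '_button' pattern followed by a hash-table lookup of the exact names.
import Mathlib
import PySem

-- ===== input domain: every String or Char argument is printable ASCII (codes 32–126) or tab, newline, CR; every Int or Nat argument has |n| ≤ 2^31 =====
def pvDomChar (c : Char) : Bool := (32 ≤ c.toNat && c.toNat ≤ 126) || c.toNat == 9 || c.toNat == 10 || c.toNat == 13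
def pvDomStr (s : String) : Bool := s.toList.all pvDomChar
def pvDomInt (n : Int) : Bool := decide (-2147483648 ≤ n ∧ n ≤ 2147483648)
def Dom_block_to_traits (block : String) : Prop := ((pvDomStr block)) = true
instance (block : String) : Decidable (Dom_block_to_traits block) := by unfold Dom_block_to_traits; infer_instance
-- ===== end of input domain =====

-- ===== PORT A =====
-- B replaces the ordered pattern scan by one suffix test plus a keyed lookup (objective: simpler).
-- the module-level `traits` table, in insertion order
def traitsTable : List (String × List String) :=
  [("_button", ["wallMountable"]),
   ("attached_melon_stem", ["orientable"]),
   ("attached_pumpkin_stem", ["orientable"]),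
   ("carved_pumpkin", ["orientable"]),
   ("jack_o_lantern", ["orientableOpposite"]),
   ("ladder", ["wallMountable"]),
   ("soul_wall_torch", ["wallMountable"]),
   ("tripwire_hook", ["wallMountable"]),
   ("wall_torch", ["wallMountable"])]

def test_pattern (pattern block : String) : Bool :=
  (PySem.Str.startswith pattern "_" && PySem.Str.endswith block pattern) || block == pattern

-- the for-loop over traits.items(); no key is a tuple, so the `type(pattern) is tuple` branch is dead
def traitsLoop (block : String) : List (String × List String) → List String
  | [] => []
  | (pattern, result) :: rest =>
      if test_pattern pattern block then result else traitsLoop block rest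

def block_to_traits (block : String) : List String :=
  traitsLoop block traitsTable

-- ===== PORT B =====
def exactDict : PySem.Dict String (List String) :=
  PySem.Dict.ofList
    [("attached_melon_stem", ["orientable"]),
     ("attached_pumpkin_stem", ["orientable"]),
     ("carved_pumpkin", ["orientable"]),
     ("jack_o_lantern", ["orientableOpposite"]),
     ("ladder", ["wallMountable"]),
     ("soul_wall_torch", ["wallMountable"]),
     ("tripwire_hook", ["wallMountable"]),
     ("wall_torch", ["wallMountable"])]

def block_to_traits_alt (block : String) : List String :=
  if PySem.Str.endswith block "_button" then ["wallMountable"]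
  else PySem.Dict.getD exactDict block []

-- ===== PRECONDITION & SPEC =====
def Spec_block_to_traits (block : String) (out : List String) : Prop := out = block_to_traits_alt block
instance (block : String) (out : List String) : Decidable (Spec_block_to_traits block out) := by unfold Spec_block_to_traits; infer_instance

-- ===== CLAIM (what is proved, stated in full; the proofs are below) =====
def Claim_equal_block_to_traits : Prop := ∀ (block : String), Dom_block_to_traits block → Spec_block_to_traits block (block_to_traits block)

-- ===== LEMMAS AND PROOFS =====
theorem loop_nil (block : String) : traitsLoop block [] = [] := rfl

theorem loop_skip (block p : String) (r : List String) (rest : List (String × List String))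
    (h : test_pattern p block = false) :
    traitsLoop block ((p, r) :: rest) = traitsLoop block rest := by
  show (if test_pattern p block = true then r else traitsLoop block rest) = traitsLoop block rest
  rw [h]
  simp

-- an exact key does not start with '_', so its test_pattern is plain equality (stated with
-- the key on the left to line up with Dict.get?_mk_cons)
theorem test_pattern_exact (block p : String) (h : PySem.Str.startswith p "_" = false) :
    test_pattern p block = (p == block) := by
  unfold test_pattern
  rw [h, Bool.false_and, Bool.false_or]
  by_cases hpb : block = p
  · subst hpb; simp
  · simp [hpb, Ne.symm hpb]

theorem loop_cons (block p : String) (r : List String) (rest : List (String × List String))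
    (h : PySem.Str.startswith p "_" = false) :
    traitsLoop block ((p, r) :: rest) = if p == block then r else traitsLoop block rest := by
  show (if test_pattern p block = true then r else traitsLoop block rest) = _
  rw [test_pattern_exact block p h]

-- ===== VERDICT (by name: the statement is the Claim_ definition above) =====
theorem block_to_traits_spec : Claim_equal_block_to_traits := by
  intro block _
  show block_to_traits block = block_to_traits_alt block
  rw [block_to_traits, block_to_traits_alt, traitsTable]
  by_cases hb : PySem.Str.endswith block "_button" = true
  · have h1 : test_pattern "_button" block = true := by
      unfold test_pattern
      rw [show PySem.Str.startswith "_button" "_" = true from by decide, hb]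
      simp
    rw [if_pos hb]
    show (if test_pattern "_button" block = true then ["wallMountable"] else traitsLoop block _)
        = ["wallMountable"]
    rw [if_pos h1]
  · have hbf : PySem.Str.endswith block "_button" = false := by
      cases hE : PySem.Str.endswith block "_button" <;> simp_all
    have h0 : test_pattern "_button" block = false := by
      unfold test_pattern
      rw [show PySem.Str.startswith "_button" "_" = true from by decide, hbf,
        show (block == "_button") = false from by
          simp only [beq_eq_false_iff_ne, ne_eq]
          intro h; subst h; exact hb (by decide)]
      simp
    rw [if_neg hb, loop_skip _ _ _ _ h0,
        loop_cons block "attached_melon_stem" _ _ (by decide),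
        loop_cons block "attached_pumpkin_stem" _ _ (by decide),
        loop_cons block "carved_pumpkin" _ _ (by decide),
        loop_cons block "jack_o_lantern" _ _ (by decide),
        loop_cons block "ladder" _ _ (by decide),
        loop_cons block "soul_wall_torch" _ _ (by decide),
        loop_cons block "tripwire_hook" _ _ (by decide),
        loop_cons block "wall_torch" _ _ (by decide), loop_nil,
        PySem.Dict.getD_eq_get?_getD,
        show exactDict = PySem.Dict.mk [("attached_melon_stem", ["orientable"]),
          ("attached_pumpkin_stem", ["orientable"]), ("carved_pumpkin", ["orientable"]),
          ("jack_o_lantern", ["orientableOpposite"]), ("ladder", ["wallMountable"]),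
          ("soul_wall_torch", ["wallMountable"]), ("tripwire_hook", ["wallMountable"]),
          ("wall_torch", ["wallMountable"])] from by decide]
    simp only [PySem.Dict.get?_mk_cons, apply_ite (fun o => Option.getD o ([] : List String)),
      Option.getD_some]
    rfl
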